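-- pv_equiv track=rewrite | github.com/ilastik/hytra | hytra/core/jsongraph.py | getLinksPerTimestep
-- ===== SOURCE A (Python) =====
-- def getLinksPerTimestep(links, timesteps):
--     """ returns linksPerTimestep = { "<timestep>": [(<idxA> (at previous timestep), <idxB> (at timestep)), (<idxA>, <idxB>), ...], ...} """
--
--     """
--     TODO: We're storing all the links in a dict in order to increase speed at the expense of efficiency.
--     This could certainly be done faster and memory-efficient if we just return the links dict for all times, without using the timestep loop.
--     """
--
--     linksDict = {}
--     for source, target in links:
--         time = str(target[0])
--         if time in linksDict:
--             linksDict[time].append((source[1], target[1]))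
--         else:
--             linksDict[time] = [(source[1], target[1])]
--
--     linksPerTimestep = {}
--     for time in timesteps:
--         if time in linksDict:
--             linksPerTimestep[time] = linksDict[time]
--         else:
--             linksPerTimestep[time] = []
--
--     return linksPerTimestep
-- ===== SOURCE B (Python) =====
-- def getLinksPerTimestep(links, timesteps):
--     """Per-timestep selection: for each requested timestep scan the links once and
--     collect the pairs whose target time matches; no grouping dict is built."""
--     return {t: [(s[1], g[1]) for s, g in links if str(g[0]) == t]
--             for t in timesteps}
-- ===== Notes on version B (the rewrite author's own statement) =====
-- stated objective: simpler
-- what changed: B replaces A's hash-grouping pass plus selection loop by a single dict comprehension that, for each requested timestep, filters the links whose target time matches (per-key scan instead of grouping), trading O(len(links)*len(timesteps)) work for a far shorter program.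
import Mathlib
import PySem

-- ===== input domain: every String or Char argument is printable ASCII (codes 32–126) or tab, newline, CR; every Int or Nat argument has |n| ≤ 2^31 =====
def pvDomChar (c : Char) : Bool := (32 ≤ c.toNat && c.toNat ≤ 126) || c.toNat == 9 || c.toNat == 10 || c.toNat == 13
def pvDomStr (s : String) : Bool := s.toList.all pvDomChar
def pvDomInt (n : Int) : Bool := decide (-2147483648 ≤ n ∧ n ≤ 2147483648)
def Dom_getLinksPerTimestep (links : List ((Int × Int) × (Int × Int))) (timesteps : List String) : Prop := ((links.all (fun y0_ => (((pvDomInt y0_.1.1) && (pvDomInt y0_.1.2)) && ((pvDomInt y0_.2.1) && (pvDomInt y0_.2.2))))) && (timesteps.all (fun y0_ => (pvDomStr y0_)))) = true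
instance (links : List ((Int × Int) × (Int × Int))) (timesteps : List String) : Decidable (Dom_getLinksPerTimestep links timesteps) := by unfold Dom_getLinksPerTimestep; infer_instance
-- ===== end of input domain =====

-- B is a per-timestep selection (a dict comprehension filtering the links for each
-- requested timestep) instead of A's hash-grouping pass plus selection loop; shorter
-- program at O(links*timesteps) cost. Return-value equivalence only.

-- ===== PORT A =====
def getLinksPerTimestep (links : List ((Int × Int) × (Int × Int))) (timesteps : List String) : List (String × List (Int × Int)) :=
  let linksDict : PySem.Dict String (List (Int × Int)) :=
    links.foldl (fun d st =>
      let time := PySem.Int.toStr st.2.1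
      if d.contains time then
        -- linksDict[time].append((source[1], target[1])): in-place list append = rebind the value
        d.insert time (d.getD time [] ++ [(st.1.2, st.2.2)])
      else
        d.insert time [(st.1.2, st.2.2)]) PySem.Dict.empty
  let linksPerTimestep : PySem.Dict String (List (Int × Int)) :=
    timesteps.foldl (fun r time =>
      if linksDict.contains time then
        r.insert time (linksDict.getD time [])
      else
        r.insert time []) PySem.Dict.empty
  linksPerTimestep.items

-- ===== PORT B =====
def getLinksPerTimestep_alt (links : List ((Int × Int) × (Int × Int))) (timesteps : List String) : List (String × List (Int × Int)) :=
  -- {t: [(s[1], g[1]) for s, g in links if str(g[0]) == t] for t in timesteps}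
  (timesteps.foldl (fun r t =>
      r.insert t ((links.filter (fun p => PySem.Int.toStr p.2.1 == t)).map (fun p => (p.1.2, p.2.2))))
    PySem.Dict.empty).items

-- ===== PRECONDITION & SPEC =====
def Spec_getLinksPerTimestep (links : List ((Int × Int) × (Int × Int))) (timesteps : List String) (out : List (String × List (Int × Int))) : Prop := out = getLinksPerTimestep_alt links timesteps
instance (links : List ((Int × Int) × (Int × Int))) (timesteps : List String) (out : List (String × List (Int × Int))) : Decidable (Spec_getLinksPerTimestep links timesteps out) := by unfold Spec_getLinksPerTimestep; infer_instance

-- ===== CLAIM (what is proved, stated in full; the proofs are below) =====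
def Claim_equal_getLinksPerTimestep : Prop := ∀ (links : List ((Int × Int) × (Int × Int))) (timesteps : List String), Dom_getLinksPerTimestep links timesteps → Spec_getLinksPerTimestep links timesteps (getLinksPerTimestep links timesteps)

-- ===== LEMMAS AND PROOFS =====

-- A's grouping step (append-or-create) is exactly dict.modify with default [].
theorem stepA_eq_modify (d : PySem.Dict String (List (Int × Int))) (t : String) (x : Int × Int) :
    (if d.contains t then d.insert t (d.getD t [] ++ [x]) else d.insert t [x])
      = d.modify t [] (· ++ [x]) := by
  by_cases h : d.contains t = true
  · simp [h, PySem.Dict.modify, PySem.Dict.getD_eq_get?_getD]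
  · simp only [Bool.not_eq_true] at h
    simp [h, PySem.Dict.modify, PySem.Dict.getD_of_not_contains _ _ h]

-- A's selection step always inserts linksDict.getD t [] (the else-branch value [] IS that default).
theorem stepSel_eq_insert_getD (d r : PySem.Dict String (List (Int × Int))) (t : String) :
    (if d.contains t then r.insert t (d.getD t []) else r.insert t [])
      = r.insert t (d.getD t []) := by
  by_cases h : d.contains t = true
  · simp [h]
  · simp only [Bool.not_eq_true] at h
    simp [h, PySem.Dict.getD_of_not_contains _ _ h]

-- The grouped value of key k produced by A's first loop is exactly B's filtered selection.
theorem getD_groupA (links : List ((Int × Int) × (Int × Int))) (k : String) :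
    (links.foldl (fun d st =>
        let time := PySem.Int.toStr st.2.1
        if d.contains time then d.insert time (d.getD time [] ++ [(st.1.2, st.2.2)])
        else d.insert time [(st.1.2, st.2.2)]) PySem.Dict.empty).getD k []
    = (links.filter (fun p => PySem.Int.toStr p.2.1 == k)).map (fun p => (p.1.2, p.2.2)) := by
  simp only [stepA_eq_modify]
  have hmap : links.foldl (fun d st => d.modify (PySem.Int.toStr st.2.1) [] (· ++ [(st.1.2, st.2.2)])) PySem.Dict.empty
      = (links.map (fun p => (PySem.Int.toStr p.2.1, (p.1.2, p.2.2)))).foldl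
          (fun d q => d.modify q.1 [] (· ++ [q.2])) PySem.Dict.empty := by
    rw [List.foldl_map]
  rw [hmap, PySem.Dict.getD_foldl_modify_append, List.filter_map, List.map_map]
  simp [Function.comp_def]

theorem getLinksPerTimestep_eq_alt (links : List ((Int × Int) × (Int × Int))) (timesteps : List String) :
    getLinksPerTimestep links timesteps = getLinksPerTimestep_alt links timesteps := by
  unfold getLinksPerTimestep getLinksPerTimestep_alt
  simp only [stepSel_eq_insert_getD]
  have hstep : (fun (r : PySem.Dict String (List (Int × Int))) (time : String) =>
      r.insert time ((links.foldl (fun d st =>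
        let t := PySem.Int.toStr st.2.1
        if d.contains t then d.insert t (d.getD t [] ++ [(st.1.2, st.2.2)])
        else d.insert t [(st.1.2, st.2.2)]) PySem.Dict.empty).getD time []))
    = (fun (r : PySem.Dict String (List (Int × Int))) (t : String) =>
      r.insert t ((links.filter (fun p => PySem.Int.toStr p.2.1 == t)).map (fun p => (p.1.2, p.2.2)))) := by
    funext r t
    rw [getD_groupA]
  rw [hstep]

-- ===== VERDICT (by name: the statement is the Claim_ definition above) =====
theorem getLinksPerTimestep_spec : Claim_equal_getLinksPerTimestep := by
  intro links timesteps _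
  unfold Spec_getLinksPerTimestep
  exact getLinksPerTimestep_eq_alt links timesteps
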